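-- pv_equiv track=rewrite | github.com/senapk/tko | src/tko/util/rtext.py | normalize_style
-- ===== SOURCE A (Python) =====
-- FG = set("krgybmcw")
--
-- BG = set("KRGYBMCW")
--
-- ATTR = set("*_/~!")
--
-- def normalize_style(style: str) -> str:
--     fg: list[str] = []
--     bg: list[str] = []
--     attr: list[str] = []
--     for c in style:
--         if c in FG:
--             fg = [c]
--         elif c in BG:
--             bg = [c]
--         elif c in ATTR and c not in attr:
--             attr.append(c)
--     return "".join(attr + fg + bg)
-- ===== SOURCE B (Python) =====
-- FG = set("krgybmcw")
--
-- BG = set("KRGYBMCW")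
--
-- ATTR = set("*_/~!")
--
-- def normalize_style(style: str) -> str:
--     fg = next((c for c in reversed(style) if c in FG), '')
--     bg = next((c for c in reversed(style) if c in BG), '')
--     attr = ''.join(dict.fromkeys(c for c in style if c in ATTR))
--     return attr + fg + bg
-- ===== Notes on version B (the rewrite author's own statement) =====
-- stated objective: idiomatic
-- what changed: Replaces A's single forward loop that mutates three accumulators with three independent comprehension-style scans: reverse scans with next() for the last fg/bg characters and dict.fromkeys for order-preserving unique attrs.
import Mathlib
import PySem

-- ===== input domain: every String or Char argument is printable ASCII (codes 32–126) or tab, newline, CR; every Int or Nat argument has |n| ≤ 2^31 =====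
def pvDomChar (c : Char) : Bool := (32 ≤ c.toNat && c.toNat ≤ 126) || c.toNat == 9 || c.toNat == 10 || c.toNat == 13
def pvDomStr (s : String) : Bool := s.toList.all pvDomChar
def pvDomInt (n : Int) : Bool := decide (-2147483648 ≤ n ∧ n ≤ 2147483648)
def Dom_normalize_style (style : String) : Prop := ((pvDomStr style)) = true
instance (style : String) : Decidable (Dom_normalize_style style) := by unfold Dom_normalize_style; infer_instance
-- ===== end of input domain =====

-- B normalizes the style by three independent scans (reverse find for last fg/bg, ordered
-- dedup for attrs) instead of A's single forward loop over three accumulators; idiomatic, same cost.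

-- membership in the module-level sets FG/BG/ATTR (only membership is used, order irrelevant)
def pvFG (c : Char) : Bool := (['k','r','g','y','b','m','c','w'] : List Char).contains c
def pvBG (c : Char) : Bool := (['K','R','G','Y','B','M','C','W'] : List Char).contains c
def pvATTR (c : Char) : Bool := (['*','_','/','~','!'] : List Char).contains c

-- ===== PORT A =====
def pvStepA (s : List Char × List Char × List Char) (c : Char) :
    List Char × List Char × List Char :=
  if pvFG c then ([c], s.2.1, s.2.2)
  else if pvBG c then (s.1, [c], s.2.2)
  else if pvATTR c && !s.2.2.contains c then (s.1, s.2.1, s.2.2 ++ [c])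
  else s

def normalize_style (style : String) : String :=
  let r := style.toList.foldl pvStepA ([], [], [])
  String.ofList (r.2.2 ++ r.1 ++ r.2.1)

-- ===== PORT B =====
def normalize_style_alt (style : String) : String :=
  let xs := style.toList
  let fg : List Char := (xs.reverse.find? pvFG).elim [] (fun c => [c])
  let bg : List Char := (xs.reverse.find? pvBG).elim [] (fun c => [c])
  let attr : List Char := PySem.List.dedup (xs.filter pvATTR)
  String.ofList (attr ++ fg ++ bg)

-- ===== PRECONDITION & SPEC =====
def Spec_normalize_style (style : String) (out : String) : Prop := out = normalize_style_alt style
instance (style : String) (out : String) : Decidable (Spec_normalize_style style out) := by unfold Spec_normalize_style; infer_instance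

-- ===== CLAIM (what is proved, stated in full; the proofs are below) =====
def Claim_equal_normalize_style : Prop := ∀ (style : String), Dom_normalize_style style → Spec_normalize_style style (normalize_style style)

-- ===== LEMMAS AND PROOFS =====

-- the three character classes are pairwise disjoint
theorem pvFG_not_attr (c : Char) (h : pvFG c = true) : pvATTR c = false := by
  simp [pvFG] at h
  rcases h with h|h|h|h|h|h|h|h <;> subst h <;> decide

theorem pvFG_not_bg (c : Char) (h : pvFG c = true) : pvBG c = false := by
  simp [pvFG] at h
  rcases h with h|h|h|h|h|h|h|h <;> subst h <;> decide

theorem pvBG_not_attr (c : Char) (h : pvBG c = true) : pvATTR c = false := by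
  simp [pvBG] at h
  rcases h with h|h|h|h|h|h|h|h <;> subst h <;> decide

-- characterization of A's fold from an arbitrary state
theorem foldA_char (xs : List Char) (fg bg attr : List Char) :
    xs.foldl pvStepA (fg, bg, attr) =
      ((xs.reverse.find? pvFG).elim fg (fun c => [c]),
       (xs.reverse.find? pvBG).elim bg (fun c => [c]),
       (xs.filter pvATTR).foldl PySem.Set.add attr) := by
  induction xs generalizing fg bg attr with
  | nil => simp
  | cons c xs ih =>
    have hfind : ∀ (p : Char → Bool) (d : List Char),
        (((c :: xs).reverse.find? p).elim d (fun c => [c])) =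
        ((xs.reverse.find? p).elim (if p c then [c] else d) (fun c => [c])) := by
      intro p d
      simp only [List.reverse_cons, List.find?_append]
      cases h : xs.reverse.find? p <;> simp
      split <;> simp_all
    have hattr : ((c :: xs).filter pvATTR).foldl PySem.Set.add attr =
        (xs.filter pvATTR).foldl PySem.Set.add
          (if pvATTR c && !attr.contains c then attr ++ [c] else attr) := by
      by_cases hA : pvATTR c = true
      · simp only [List.filter_cons, hA, if_pos, List.foldl_cons]
        congr 1
        by_cases hc : attr.contains c = true <;>
          simp [PySem.Set.add, PySem.Set.contains, hc]
      · simp only [Bool.not_eq_true] at hA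
        simp [hA]
    rw [List.foldl_cons, hfind, hfind, hattr]
    by_cases hF : pvFG c = true
    · simp [pvStepA, hF, pvFG_not_attr c hF, pvFG_not_bg c hF, ih]
    · by_cases hB : pvBG c = true
      · simp [pvStepA, hF, hB, pvBG_not_attr c hB, ih]
      · simp only [Bool.not_eq_true] at hF hB
        simp [pvStepA, hF, hB, ih]
        refine ⟨?_, ?_, ?_⟩ <;> split <;> simp_all

-- ===== VERDICT (by name: the statement is the Claim_ definition above) =====
theorem normalize_style_spec : Claim_equal_normalize_style := by
  intro style _
  unfold Spec_normalize_style normalize_style normalize_style_alt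
  simp only [foldA_char, PySem.List.dedup_eq_ofList, PySem.Set.ofList_eq_foldl]
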